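-- pv_equiv track=rewrite | github.com/ChristianMertes/A342585 | print_sequence.py | aupton
-- ===== SOURCE A (Python) =====
-- from collections import Counter
-- from itertools import count
--
-- def aupton(target: int):
--     """adapted from Michael S. Branicky's code from Jun 12 2021"""
--     num: int = 0
--     alst: list[int] = [0]
--     inventory: Counter[int] = Counter([0])
--     yield 0
--     for n in range(2, target + 1) if target > 1 else count(2):
--         c = inventory[num]
--         num = 0 if c == 0 else num + 1
--         alst.append(c)
--         inventory.update([c])
--         yield c
-- ===== SOURCE B (Python) =====
-- from itertools import count
--
-- def aupton(target: int):
--     """Two-level inventory: within a row the base table is read-only and the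
--     row's own terms are tallied in a small delta dict, merged into the base
--     only when the row ends at a zero count."""
--     base = {0: 1}
--     yield 0
--     emitted = 1
--     limited = target > 1
--     while True:
--         row = {}
--         for num in count(0):
--             c = base.get(num, 0) + row.get(num, 0)
--             row[c] = row.get(c, 0) + 1
--             yield c
--             emitted += 1
--             if limited and emitted >= target:
--                 return
--             if c == 0:
--                 break
--         for k, v in row.items():
--             base[k] = base.get(k, 0) + v
-- ===== Notes on version B (the rewrite author's own statement) =====
-- stated objective: alternative
-- what changed: Replaces A's single global Counter updated per term (with a reset pointer) by a two-level row traversal: each row reads a frozen base table plus a row-local delta dict and the delta is merged into the base only at row boundaries, avoiding Counter.update's per-term overhead.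
import Mathlib
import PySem

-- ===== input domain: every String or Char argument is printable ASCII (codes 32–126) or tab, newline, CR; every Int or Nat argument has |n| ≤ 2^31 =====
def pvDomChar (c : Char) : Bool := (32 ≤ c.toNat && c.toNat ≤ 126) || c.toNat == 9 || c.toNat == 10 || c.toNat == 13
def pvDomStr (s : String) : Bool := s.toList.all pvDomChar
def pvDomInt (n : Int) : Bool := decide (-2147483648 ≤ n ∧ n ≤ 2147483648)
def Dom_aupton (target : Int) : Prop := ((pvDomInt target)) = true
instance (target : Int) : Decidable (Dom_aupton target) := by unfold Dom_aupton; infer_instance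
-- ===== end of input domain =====

-- B replaces A's per-term-updated global Counter (with a reset pointer) by a two-level
-- scheme: rows read a frozen base table plus a row-local delta dict, merged at row ends.

-- ===== PORT A =====
-- flat for-loop over range(2, target+1) carrying (num, Counter inventory, alst)
def aupton (target : Int) : List Int :=
  (((PySem.List.pyRange 2 (target + 1) 1).foldl
    (fun (s : Int × PySem.Dict Int Int × List Int) _ =>
      let c := s.2.1.getD s.1 0
      let num := if c = 0 then 0 else s.1 + 1
      (num, s.2.1.modify c 0 (· + 1), s.2.2 ++ [c]))
    (0, PySem.Dict.counter [(0 : Int)], [0]))).2.2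

-- ===== PORT B =====
-- inner `for num in count(0)` loop of one row: base is read-only, the row's own
-- terms are tallied in `row`.  Returns (remaining budget, row, terms, returned?):
-- returned? = true is Python's `return` (budget exhausted), false its `break` (c == 0).
def auptonAltInner : Nat → Int → PySem.Dict Int Int → PySem.Dict Int Int → List Int →
    Nat × PySem.Dict Int Int × List Int × Bool
  | 0, _, _, row, acc => (0, row, acc, true)
  | n + 1, num, base, row, acc =>
    let c := base.getD num 0 + row.getD num 0
    let row' := row.insert c (row.getD c 0 + 1)
    let acc' := acc ++ [c]
    if n = 0 then (0, row', acc', true)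
    else if c = 0 then (n, row', acc', false)
    else auptonAltInner n (num + 1) base row' acc'

-- `for k, v in row.items(): base[k] = base.get(k, 0) + v`
def auptonMergeRow (base row : PySem.Dict Int Int) : PySem.Dict Int Int :=
  row.items.foldl (fun b kv => b.insert kv.1 (b.getD kv.1 0 + kv.2)) base

-- budget strictly decreases across one row (cited by auptonAltOuter's decreasing_by)
theorem auptonAltInner_fst_le : ∀ (n : Nat) (num : Int) (base row : PySem.Dict Int Int) (acc : List Int),
    (auptonAltInner n num base row acc).1 ≤ n - 1 := by
  intro n
  induction n with
  | zero => intro num base row acc; simp [auptonAltInner]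
  | succ m ih =>
    intro num base row acc
    show (if m = 0 then _ else if base.getD num 0 + row.getD num 0 = 0 then (m, _, _, false)
          else auptonAltInner m (num + 1) base _ _).1 ≤ m + 1 - 1
    split_ifs with h1 h2
    · omega
    · omega
    · exact le_trans (ih _ _ _ _) (by omega)

-- outer `while True` loop: one row per iteration, merging the row's tally at its end
def auptonAltOuter : Nat → PySem.Dict Int Int → List Int → List Int
  | 0, _, acc => acc
  | n + 1, base, acc =>
    let r := auptonAltInner (n + 1) 0 base PySem.Dict.empty acc
    if r.2.2.2 then r.2.2.1 else auptonAltOuter r.1 (auptonMergeRow base r.2.1) r.2.2.1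
  termination_by n _ _ => n
  decreasing_by exact Nat.lt_succ_of_le (by simpa using auptonAltInner_fst_le (n + 1) 0 base PySem.Dict.empty acc)

def aupton_alt (target : Int) : List Int :=
  auptonAltOuter (target - 1).toNat ((PySem.Dict.empty).insert 0 1) [0]

-- ===== PRECONDITION & SPEC =====
-- Pre_ excludes target ≤ 1, on which Python A is an endless generator (list(aupton(t)) never returns).
def Pre_aupton (target : Int) : Prop := 2 ≤ target
instance (target : Int) : Decidable (Pre_aupton target) := by unfold Pre_aupton; infer_instance
def pvWitness_aupton : Int := 7

def Spec_aupton (target : Int) (out : List Int) : Prop := out = aupton_alt target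
instance (target : Int) (out : List Int) : Decidable (Spec_aupton target out) := by unfold Spec_aupton; infer_instance

-- ===== CLAIM =====
def Claim_equal_aupton : Prop := ∀ (target : Int), Dom_aupton target → Pre_aupton target → Spec_aupton target (aupton target)

-- ===== LEMMAS AND PROOFS =====

-- A's flat loop, restated as recursion on the iteration count
def flatLoop : Nat → Int → PySem.Dict Int Int → List Int → List Int
  | 0, _, _, acc => acc
  | n + 1, num, inv, acc =>
    let c := inv.getD num 0
    flatLoop n (if c = 0 then 0 else num + 1) (inv.modify c 0 (· + 1)) (acc ++ [c])

-- the same loop with the Counter replaced by prefix counting (the common reference)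
def flatCount : Nat → Int → List Int → List Int
  | 0, _, acc => acc
  | n + 1, num, acc =>
    let c : Int := acc.count num
    flatCount n (if c = 0 then 0 else num + 1) (acc ++ [c])

theorem foldl_eq_flatLoop : ∀ (l : List Int) (num : Int) (inv : PySem.Dict Int Int) (acc : List Int),
    ((l.foldl
      (fun (s : Int × PySem.Dict Int Int × List Int) _ =>
        let c := s.2.1.getD s.1 0
        let num := if c = 0 then 0 else s.1 + 1
        (num, s.2.1.modify c 0 (· + 1), s.2.2 ++ [c]))
      (num, inv, acc))).2.2 = flatLoop l.length num inv acc := by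
  intro l
  induction l with
  | nil => intro num inv acc; rfl
  | cons x xs ih => intro num inv acc; simp only [List.foldl_cons, List.length_cons, flatLoop]; exact ih _ _ _

theorem aupton_eq_flatLoop (target : Int) :
    aupton target = flatLoop (target - 1).toNat 0 (PySem.Dict.counter [(0 : Int)]) [0] := by
  rw [aupton, foldl_eq_flatLoop, PySem.List.length_pyRange_one]
  congr 1
  omega

-- A's side: the Counter stays the counter of the emitted prefix
theorem flatLoop_counter_eq_flatCount : ∀ (n : Nat) (num : Int) (acc : List Int),
    flatLoop n num (PySem.Dict.counter acc) acc = flatCount n num acc := by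
  intro n
  induction n with
  | zero => intro num acc; rfl
  | succ m ih =>
    intro num acc
    show flatLoop (m + 1) num (PySem.Dict.counter acc) acc = flatCount (m + 1) num acc
    rw [flatLoop, flatCount]
    simp only [PySem.Dict.getD_counter]
    rw [← PySem.Dict.counter_append_singleton]
    exact ih _ _

-- sum of the values attached to key v in a pair list
def pairSum (l : List (Int × Int)) (v : Int) : Int :=
  ((l.filter (fun kv => kv.1 == v)).map Prod.snd).sum

theorem pairSum_cons (k w : Int) (rest : List (Int × Int)) (v : Int) :
    pairSum ((k, w) :: rest) v = (if k = v then w else 0) + pairSum rest v := by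
  by_cases h : k = v
  · simp [pairSum, h]
  · simp [pairSum, h]

-- the merge loop adds, key by key, exactly the pair-list's tallies
theorem getD_mergeFold : ∀ (l : List (Int × Int)) (b : PySem.Dict Int Int) (v : Int),
    (l.foldl (fun b kv => b.insert kv.1 (b.getD kv.1 0 + kv.2)) b).getD v 0 =
      b.getD v 0 + pairSum l v := by
  intro l
  induction l with
  | nil => intro b v; simp [pairSum]
  | cons kv rest ih =>
    intro b v
    rw [List.foldl_cons, ih, pairSum_cons, PySem.Dict.getD_insert]
    by_cases h : v = kv.1
    · rw [if_pos h, if_pos h.symm]; subst h; ring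
    · rw [if_neg h, if_neg (fun hh => h hh.symm)]; ring

theorem filter_beq_of_nodup (l : List Int) (v : Int) (h : l.Nodup) :
    l.filter (fun k => k == v) = if v ∈ l then [v] else [] := by
  induction l with
  | nil => simp
  | cons x xs ih =>
    rcases List.nodup_cons.mp h with ⟨hx, hxs⟩
    by_cases hv : x = v
    · subst hv
      rw [List.filter_cons_of_pos (by simp)]
      simp [ih hxs, hx]
    · rw [List.filter_cons_of_neg (by simp [hv])]
      rw [ih hxs]
      by_cases hm : v ∈ xs
      · simp [hm, Ne.symm hv]
      · simp [hm, Ne.symm hv]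

-- on a dict with unique keys, pairSum over items is the dict's own tally
theorem pairSum_items (row : PySem.Dict Int Int) (v : Int) (h : row.keys.Nodup) :
    pairSum row.items v = row.getD v 0 := by
  rw [pairSum, PySem.Dict.items_eq_map_keys row h 0, List.filter_map]
  have hcomp : ((fun kv : Int × Int => kv.1 == v) ∘ fun k => (k, row.getD k 0)) = fun k => k == v := rfl
  rw [hcomp, filter_beq_of_nodup _ _ h]
  by_cases hm : v ∈ row.keys
  · simp [hm]
  · have hcf : row.contains v = false := by
      by_contra hc
      exact hm ((PySem.Dict.contains_iff_mem_keys row v).mp (by revert hc; cases row.contains v <;> simp))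
    simp [hm, PySem.Dict.getD_of_not_contains row 0 hcf]

theorem getD_mergeRow (base row : PySem.Dict Int Int) (v : Int) (h : row.keys.Nodup) :
    (auptonMergeRow base row).getD v 0 = base.getD v 0 + row.getD v 0 := by
  rw [auptonMergeRow, getD_mergeFold, pairSum_items row v h]

-- count of a one-element append, cast to Int
theorem count_append_singleton (acc : List Int) (c v : Int) :
    ((acc ++ [c]).count v : Int) = (acc.count v : Int) + (if v = c then 1 else 0) := by
  rw [List.count_append]
  by_cases h : v = c
  · subst h; simp
  · simp [Ne.symm h, h]

-- a row (with invariant base + row = counter of the prefix) followed by the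
-- remaining rows computes the same terms as the flat count loop
theorem innerOuter_eq_flatCount : ∀ (n : Nat) (num : Int) (base row : PySem.Dict Int Int) (acc : List Int),
    0 < n → row.keys.Nodup →
    (∀ v, base.getD v 0 + row.getD v 0 = (acc.count v : Int)) →
    (let r := auptonAltInner n num base row acc
     if r.2.2.2 then r.2.2.1 else auptonAltOuter r.1 (auptonMergeRow base r.2.1) r.2.2.1) =
      flatCount n num acc := by
  intro n
  induction n using Nat.strong_induction_on with
  | _ n ih =>
    intro num base row acc hn hnd hinv
    have hc : base.getD num 0 + row.getD num 0 = (acc.count num : Int) := hinv num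
    have hnd' : (row.insert (base.getD num 0 + row.getD num 0)
        (row.getD (base.getD num 0 + row.getD num 0) 0 + 1)).keys.Nodup :=
      PySem.Dict.nodup_keys_insert _ _ _ hnd
    have hinv' : ∀ v, base.getD v 0 +
        (row.insert (base.getD num 0 + row.getD num 0)
          (row.getD (base.getD num 0 + row.getD num 0) 0 + 1)).getD v 0 =
        ((acc ++ [base.getD num 0 + row.getD num 0]).count v : Int) := by
      intro v
      rw [count_append_singleton, ← hinv v, PySem.Dict.getD_insert]
      by_cases h : v = base.getD num 0 + row.getD num 0
      · rw [if_pos h, if_pos h, h]; ring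
      · rw [if_neg h, if_neg h]; ring
    match n, hn with
    | 1, _ =>
      show acc ++ [base.getD num 0 + row.getD num 0] = acc ++ [((acc.count num : Nat) : Int)]
      rw [hc]
    | (m + 2), _ =>
      have hI : auptonAltInner (m + 2) num base row acc =
          (if base.getD num 0 + row.getD num 0 = 0
           then (m + 1, row.insert (base.getD num 0 + row.getD num 0) (row.getD (base.getD num 0 + row.getD num 0) 0 + 1),
                 acc ++ [base.getD num 0 + row.getD num 0], false)
           else auptonAltInner (m + 1) (num + 1) base
             (row.insert (base.getD num 0 + row.getD num 0) (row.getD (base.getD num 0 + row.getD num 0) 0 + 1))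
             (acc ++ [base.getD num 0 + row.getD num 0])) := rfl
      have hF : flatCount (m + 2) num acc =
          flatCount (m + 1) (if (acc.count num : Int) = 0 then 0 else num + 1)
            (acc ++ [(acc.count num : Int)]) := rfl
      by_cases hz : base.getD num 0 + row.getD num 0 = 0
      · have hF' : flatCount (m + 2) num acc =
            flatCount (m + 1) 0 (acc ++ [(acc.count num : Int)]) := by
          rw [hF, if_pos (by rw [← hc]; exact hz)]
        rw [hI, if_pos hz]
        show auptonAltOuter (m + 1) (auptonMergeRow base _) (acc ++ [base.getD num 0 + row.getD num 0]) =
          flatCount (m + 2) num acc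
        rw [hF', ← hc, auptonAltOuter]
        exact ih (m + 1) (by omega) 0 _ PySem.Dict.empty _ (by omega)
          (by simp)
          (by intro v
              rw [getD_mergeRow _ _ _ hnd', PySem.Dict.getD_empty, add_zero]
              exact hinv' v)
      · have hF' : flatCount (m + 2) num acc =
            flatCount (m + 1) (num + 1) (acc ++ [(acc.count num : Int)]) := by
          rw [hF, if_neg (by rw [← hc]; exact hz)]
        rw [hI, if_neg hz, hF', ← hc]
        exact ih (m + 1) (by omega) (num + 1) base _ _ (by omega) hnd' hinv'

theorem alt_eq_flatCount (n : Nat) (base : PySem.Dict Int Int) (acc : List Int)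
    (hn : 0 < n) (hinv : ∀ v, base.getD v 0 = (acc.count v : Int)) :
    auptonAltOuter n base acc = flatCount n 0 acc := by
  match n, hn with
  | m + 1, _ =>
    rw [auptonAltOuter]
    exact innerOuter_eq_flatCount (m + 1) 0 base PySem.Dict.empty acc (by omega)
      (by simp)
      (by intro v; rw [PySem.Dict.getD_empty, add_zero]; exact hinv v)

-- ===== VERDICT =====
theorem aupton_spec : Claim_equal_aupton := by
  intro target _ hpre
  unfold Spec_aupton
  rw [aupton_eq_flatLoop, aupton_alt,
    alt_eq_flatCount _ _ _ (by unfold Pre_aupton at hpre; omega)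
      (by intro v
          rw [PySem.Dict.getD_insert]
          by_cases h : v = 0
          · subst h; simp
          · rw [if_neg h]
            simp only [List.count_cons, List.count_nil]
            simp only [beq_iff_eq]
            rw [if_neg (fun hh : (0 : Int) = v => h hh.symm)]
            simp),
    flatLoop_counter_eq_flatCount]
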